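-- pv_equiv track=rewrite | github.com/F34121094/Python_learning_history_zerojudge | TEL/nAnB problem.py | check_p
-- ===== SOURCE A (Python) =====
-- def check_p(correct, type):
--     time = 0
--     a = []
--     for i in range(len(correct)):
--         if correct[i] == type[i]:
--             time += 1
--             a = [i] + a
--         else:
--             continue
--     for i in a:
--         correct = correct[:i] + correct[i+1:]
--         type = type[:i] + type[i+1:]
--     return time,correct,type
-- ===== SOURCE B (Python) =====
-- def check_p(correct, type):
--     matched = {i for i, c in enumerate(correct) if c == type[i]}
--     rest_c = ''.join(c for i, c in enumerate(correct) if i not in matched)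
--     rest_t = ''.join(t for i, t in enumerate(type) if i not in matched)
--     return len(matched), rest_c, rest_t
-- ===== Notes on version B (the rewrite author's own statement) =====
-- stated objective: faster
-- what changed: Replaced A's two-phase scheme (collect matched indices, then repeatedly rebuild both strings by slicing each index out) with computing the matched-position set once and filtering each string by it; Pre_ excludes only inputs where len(type) < len(correct), on which both A and B raise IndexError.
import Mathlib
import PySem

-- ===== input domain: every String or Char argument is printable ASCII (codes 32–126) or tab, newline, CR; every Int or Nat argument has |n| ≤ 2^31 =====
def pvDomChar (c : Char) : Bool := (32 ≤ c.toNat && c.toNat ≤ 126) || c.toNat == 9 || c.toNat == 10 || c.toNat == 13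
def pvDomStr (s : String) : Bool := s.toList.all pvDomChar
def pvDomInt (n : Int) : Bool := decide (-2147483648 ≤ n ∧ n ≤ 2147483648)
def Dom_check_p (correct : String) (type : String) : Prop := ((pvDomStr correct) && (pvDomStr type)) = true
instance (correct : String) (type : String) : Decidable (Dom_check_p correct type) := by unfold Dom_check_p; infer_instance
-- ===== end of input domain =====

-- B replaces A's two-phase scheme (record matched indices, then repeatedly rebuild both strings
-- by slicing each index out) with: compute the set of matched positions once, then filter each
-- string by that set; O(n) set lookups instead of O(n) string rebuilds.

-- ===== PORT A =====
-- one step of A's second loop: correct = correct[:i] + correct[i+1:]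
def pvRmAt (xs : List Char) (i : Int) : List Char :=
  PySem.List.slice xs none (some i) ++ PySem.List.slice xs (some (i + 1)) none

def check_p (correct : String) (type : String) : Int × String × String :=
  let cs := correct.toList
  let ts := type.toList
  -- first loop: time += 1 and a = [i] + a whenever correct[i] == type[i]
  -- (correct[i]/type[i] ported as pyGet?; the IndexError case is excluded by Pre_check_p)
  let st := (PySem.List.pyRange 0 (cs.length : Int) 1).foldl
    (fun (st : Int × List Int) i =>
      if PySem.List.pyGet? cs i = PySem.List.pyGet? ts i then (st.1 + 1, i :: st.2) else st)
    (0, [])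
  -- second loop: delete each recorded index from both strings
  let fin := st.2.foldl (fun (p : List Char × List Char) i => (pvRmAt p.1 i, pvRmAt p.2 i)) (cs, ts)
  (st.1, String.ofList fin.1, String.ofList fin.2)

-- ===== PORT B =====
-- Source B's set comprehension: {i for i, c in enumerate(correct) if c == type[i]}
-- (type[i] ported as pyGet?; its IndexError case is excluded by Pre_check_p)
def pvMatchedSet (cs ts : List Char) : PySem.Set Int :=
  (PySem.List.enumerate cs 0).foldl
    (fun (s : PySem.Set Int) p =>
      if PySem.List.pyGet? ts p.1 = some p.2 then PySem.Set.add s p.1 else s)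
    PySem.Set.empty

def check_p_alt (correct : String) (type : String) : Int × String × String :=
  let cs := correct.toList
  let ts := type.toList
  let matched := pvMatchedSet cs ts
  -- ''.join(c for i, c in enumerate(correct) if i not in matched)
  let rc := (PySem.List.enumerate cs 0).foldl
    (fun (acc : List Char) p => if matched.contains p.1 then acc else acc ++ [p.2]) []
  -- ''.join(t for i, t in enumerate(type) if i not in matched)
  let rt := (PySem.List.enumerate ts 0).foldl
    (fun (acc : List Char) p => if matched.contains p.1 then acc else acc ++ [p.2]) []
  (PySem.Set.len matched, String.ofList rc, String.ofList rt)

-- ===== PRECONDITION & SPEC =====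
-- Pre_ excludes exactly the inputs where len(type) < len(correct): there A (and B alike) raises
-- IndexError on type[i]; it never excludes an input on which A returns.
def Pre_check_p (correct : String) (type : String) : Prop :=
  correct.toList.length ≤ type.toList.length
instance (correct : String) (type : String) : Decidable (Pre_check_p correct type) := by
  unfold Pre_check_p; infer_instance

def pvWitness_check_p : String × String := ("ab", "ac")

def Spec_check_p (correct : String) (type : String) (out : Int × String × String) : Prop :=
  out = check_p_alt correct type
instance (correct : String) (type : String) (out : Int × String × String) :
    Decidable (Spec_check_p correct type out) := by unfold Spec_check_p; infer_instance

-- ===== CLAIM (what is proved, stated in full; the proofs are below) =====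
def Claim_equal_check_p : Prop := ∀ (correct : String) (type : String),
  Dom_check_p correct type → Pre_check_p correct type →
  Spec_check_p correct type (check_p correct type)

-- ===== LEMMAS AND PROOFS =====

-- count of matching positions among the first k indices (A's `time`)
def pvCnt (cs ts : List Char) : Nat → Int
  | 0 => 0
  | k + 1 => pvCnt cs ts k + (if cs[k]? = ts[k]? then 1 else 0)

-- A's list `a`: matched indices below k, largest first
def pvA (cs ts : List Char) : Nat → List Int
  | 0 => []
  | k + 1 => if cs[k]? = ts[k]? then (k : Int) :: pvA cs ts k else pvA cs ts k

-- characters of cs at mismatched positions below k, in order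
def pvF (cs ts : List Char) : Nat → List Char
  | 0 => []
  | k + 1 => if cs[k]? = ts[k]? then pvF cs ts k else pvF cs ts k ++ (cs[k]?).toList

-- characters of ts at mismatched positions below k, in order
def pvG (cs ts : List Char) : Nat → List Char
  | 0 => []
  | k + 1 => if cs[k]? = ts[k]? then pvG cs ts k else pvG cs ts k ++ (ts[k]?).toList

-- B's matched set as a plain list: the indices j, j+1, … paired with cs, kept when ts[idx] = char
def pvM (ts : List Char) : List Char → Nat → List Int
  | [], _ => []
  | c :: cs, j => (if ts[j]? = some c then [(j : Int)] else []) ++ pvM ts cs (j + 1)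

-- B's filter: characters of xs from position j on whose absolute position is not in m
def pvSel (m : List Int) : List Char → Nat → List Char
  | [], _ => []
  | x :: xs, j => (if (j : Int) ∈ m then [] else [x]) ++ pvSel m xs (j + 1)

theorem pv_phase1 (cs ts : List Char) (n : Nat) :
    (PySem.List.pyRange 0 (n : Int) 1).foldl
      (fun (st : Int × List Int) i =>
        if PySem.List.pyGet? cs i = PySem.List.pyGet? ts i then (st.1 + 1, i :: st.2) else st)
      (0, []) = (pvCnt cs ts n, pvA cs ts n) := by
  induction n with
  | zero => simp [PySem.List.pyRange_one_eq_nil, pvCnt, pvA]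
  | succ n ih =>
    have h : ((n : Int) + 1) = ((n + 1 : Nat) : Int) := by push_cast; ring
    rw [← h, PySem.List.pyRange_one_succ_right (by positivity), List.foldl_append, ih]
    simp [pvCnt, pvA]
    split <;> simp

theorem pv_phase2 (cs ts : List Char) (n : Nat) :
    ∀ (xs ys : List Char), n ≤ xs.length → n ≤ ys.length →
    (∀ i, i < n → xs[i]? = cs[i]?) → (∀ i, i < n → ys[i]? = ts[i]?) →
    (pvA cs ts n).foldl (fun (p : List Char × List Char) i => (pvRmAt p.1 i, pvRmAt p.2 i)) (xs, ys)
      = (pvF cs ts n ++ xs.drop n, pvG cs ts n ++ ys.drop n) := by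
  induction n with
  | zero => intro xs ys _ _ _ _; simp [pvA, pvF, pvG]
  | succ n ih =>
    intro xs ys hx hy hax hay
    have hxn : n < xs.length := hx
    have hyn : n < ys.length := hy
    have hrm : ∀ zs : List Char, pvRmAt zs ((n : Nat) : Int) = zs.take n ++ zs.drop (n + 1) := by
      intro zs
      have h1 : ((n : Int) + 1) = ((n + 1 : Nat) : Int) := by push_cast; ring
      rw [pvRmAt, PySem.List.slice_to_natCast, h1, PySem.List.slice_from_natCast]
    by_cases h : cs[n]? = ts[n]?
    · rw [show pvA cs ts (n+1) = (n : Int) :: pvA cs ts n from by simp [pvA, h]]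
      rw [List.foldl_cons]
      simp only [hrm]
      rw [ih (xs.take n ++ xs.drop (n+1)) (ys.take n ++ ys.drop (n+1))
            (by simp; omega) (by simp; omega)
            (by intro i hi
                rw [List.getElem?_append_left (by simp; omega)]
                simp [hi]; exact hax i (by omega))
            (by intro i hi
                rw [List.getElem?_append_left (by simp; omega)]
                simp [hi]; exact hay i (by omega))]
      have hdrop : ∀ zs : List Char, n ≤ zs.length →
          (zs.take n ++ zs.drop (n+1)).drop n = zs.drop (n+1) := by
        intro zs hz
        have hl : (zs.take n).length = n := by simp; omega
        calc (zs.take n ++ zs.drop (n+1)).drop n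
            = (zs.take n ++ zs.drop (n+1)).drop (zs.take n).length := by rw [hl]
          _ = zs.drop (n+1) := List.drop_left
      have hdx := hdrop xs (by omega)
      have hdy := hdrop ys (by omega)
      rw [hdx, hdy]
      simp [pvF, pvG, h]
    · rw [show pvA cs ts (n+1) = pvA cs ts n from by simp [pvA, h]]
      rw [ih xs ys (by omega) (by omega) (fun i hi => hax i (by omega)) (fun i hi => hay i (by omega))]
      have hcx : cs[n]? = some xs[n] := by rw [← hax n (by omega)]; simp [hxn]
      have hcy : ts[n]? = some ys[n] := by rw [← hay n (by omega)]; simp [hyn]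
      have hne : ¬ xs[n] = ys[n] := by
        intro he; exact h (by rw [hcx, hcy, he])
      rw [List.drop_eq_getElem_cons hxn, List.drop_eq_getElem_cons hyn]
      simp [pvF, pvG, hcx, hcy, hne]

theorem pv_shiftCnt (c t : Char) (cs ts : List Char) (k : Nat) :
    pvCnt (c :: cs) (t :: ts) (k + 1) = (if c = t then 1 else 0) + pvCnt cs ts k := by
  induction k with
  | zero => simp [pvCnt]
  | succ k ih =>
    rw [show pvCnt (c :: cs) (t :: ts) (k + 1 + 1)
          = pvCnt (c :: cs) (t :: ts) (k + 1)
            + (if (c :: cs)[k + 1]? = (t :: ts)[k + 1]? then 1 else 0) from rfl, ih]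
    simp only [List.getElem?_cons_succ, pvCnt]
    split_ifs <;> omega

theorem pv_shiftF (c t : Char) (cs ts : List Char) (k : Nat) :
    pvF (c :: cs) (t :: ts) (k + 1) = (if c = t then [] else [c]) ++ pvF cs ts k := by
  induction k with
  | zero => simp [pvF]
  | succ k ih =>
    rw [show pvF (c :: cs) (t :: ts) (k + 1 + 1)
          = (if (c :: cs)[k + 1]? = (t :: ts)[k + 1]? then pvF (c :: cs) (t :: ts) (k + 1)
             else pvF (c :: cs) (t :: ts) (k + 1) ++ ((c :: cs)[k + 1]?).toList) from rfl, ih]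
    simp only [List.getElem?_cons_succ, pvF]
    split_ifs <;> simp

theorem pv_shiftG (c t : Char) (cs ts : List Char) (k : Nat) :
    pvG (c :: cs) (t :: ts) (k + 1) = (if c = t then [] else [t]) ++ pvG cs ts k := by
  induction k with
  | zero => simp [pvG]
  | succ k ih =>
    rw [show pvG (c :: cs) (t :: ts) (k + 1 + 1)
          = (if (c :: cs)[k + 1]? = (t :: ts)[k + 1]? then pvG (c :: cs) (t :: ts) (k + 1)
             else pvG (c :: cs) (t :: ts) (k + 1) ++ ((t :: ts)[k + 1]?).toList) from rfl, ih]
    simp only [List.getElem?_cons_succ, pvG]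
    split_ifs <;> simp

-- every index recorded in pvM is at least the starting offset
theorem pv_mem_pvM_le (ts : List Char) : ∀ (cs : List Char) (j : Nat) (x : Int),
    x ∈ pvM ts cs j → (j : Int) ≤ x := by
  intro cs
  induction cs with
  | nil => intro j x hx; simp [pvM] at hx
  | cons c cs ih =>
    intro j x hx
    simp only [pvM, List.mem_append] at hx
    rcases hx with hx | hx
    · split at hx <;> simp_all
    · have := ih (j + 1) x hx
      push_cast at this ⊢
      omega

-- the set-building fold of port B produces exactly the list pvM (indices are fresh, so add appends)
theorem pv_fold_matched (ts : List Char) : ∀ (cs : List Char) (j : Nat) (s0 : List Int),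
    (∀ x ∈ s0, x < (j : Int)) →
    (PySem.List.enumerate cs (j : Int)).foldl
      (fun (s : PySem.Set Int) p =>
        if PySem.List.pyGet? ts p.1 = some p.2 then PySem.Set.add s p.1 else s) s0
    = s0 ++ pvM ts cs j := by
  intro cs
  induction cs with
  | nil => intro j s0 _; simp [PySem.List.enumerate_nil, pvM]
  | cons c cs ih =>
    intro j s0 hs0
    rw [PySem.List.enumerate_cons]
    rw [List.foldl_cons]
    have hcast : (j : Int) + 1 = ((j + 1 : Nat) : Int) := by push_cast; ring
    by_cases h : ts[j]? = some c
    · have hget : PySem.List.pyGet? ts ((j : Nat) : Int) = some c := by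
        rw [PySem.List.pyGet?_natCast]; exact h
      have hnm : (j : Int) ∉ s0 := fun hmem => absurd (hs0 _ hmem) (by omega)
      have hadd : PySem.Set.add s0 ((j : Nat) : Int) = s0 ++ [(j : Int)] := by
        simp [PySem.Set.add, hnm]
      rw [if_pos hget, hadd, hcast, ih (j + 1) (s0 ++ [(j : Int)])
            (by intro x hx
                rcases List.mem_append.mp hx with hx | hx
                · have := hs0 x hx; push_cast; omega
                · simp at hx; push_cast; omega)]
      simp [pvM, h]
    · have hget : ¬ PySem.List.pyGet? ts ((j : Nat) : Int) = some c := by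
        rw [PySem.List.pyGet?_natCast]; exact h
      rw [if_neg hget, hcast, ih (j + 1) s0
            (by intro x hx; have := hs0 x hx; push_cast; omega)]
      simp [pvM, h]

-- the filter fold of port B is pvSel
theorem pv_fold_sel (m : PySem.Set Int) : ∀ (xs : List Char) (j : Nat) (acc : List Char),
    (PySem.List.enumerate xs (j : Int)).foldl
      (fun (acc : List Char) p => if m.contains p.1 then acc else acc ++ [p.2]) acc
    = acc ++ pvSel m xs j := by
  intro xs
  induction xs with
  | nil => intro j acc; simp [PySem.List.enumerate_nil, pvSel]
  | cons x xs ih =>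
    intro j acc
    rw [PySem.List.enumerate_cons, List.foldl_cons]
    have hcast : (j : Int) + 1 = ((j + 1 : Nat) : Int) := by push_cast; ring
    by_cases h : (j : Int) ∈ m
    · have hc : m.contains ((j : Nat) : Int) = true := (PySem.Set.contains_iff m _).mpr h
      rw [if_pos hc, hcast, ih (j + 1) acc]
      simp [pvSel, h]
    · have hc : ¬ m.contains ((j : Nat) : Int) = true := fun hh => h ((PySem.Set.contains_iff m _).mp hh)
      rw [if_neg hc, hcast, ih (j + 1) (acc ++ [x])]
      simp [pvSel, h]

theorem pvSel_nil_mask : ∀ (xs : List Char) (j : Nat), pvSel [] xs j = xs := by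
  intro xs
  induction xs with
  | nil => intro j; simp [pvSel]
  | cons x xs ih => intro j; simp [pvSel, ih (j + 1)]

theorem pvM_shift (t : Char) (ts : List Char) : ∀ (cs : List Char) (j : Nat),
    pvM (t :: ts) cs (j + 1) = (pvM ts cs j).map (· + 1) := by
  intro cs
  induction cs with
  | nil => intro j; simp [pvM]
  | cons c cs ih =>
    intro j
    simp only [pvM, List.getElem?_cons_succ, ih (j + 1), List.map_append]
    congr 1
    split <;> simp

theorem pvSel_shift (m : List Int) : ∀ (xs : List Char) (j : Nat),
    pvSel (m.map (· + 1)) xs (j + 1) = pvSel m xs j := by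
  intro xs
  induction xs with
  | nil => intro j; simp [pvSel]
  | cons x xs ih =>
    intro j
    simp only [pvSel, ih (j + 1)]
    congr 1
    have hmem : (((j + 1 : Nat) : Int) ∈ m.map (· + 1)) ↔ ((j : Nat) : Int) ∈ m := by
      simp only [List.mem_map]
      constructor
      · rintro ⟨y, hy, he⟩
        have : y = (j : Int) := by push_cast at he; omega
        simpa [this] using hy
      · intro hj; exact ⟨(j : Int), hj, by push_cast; ring⟩
    by_cases h : ((j : Nat) : Int) ∈ m
    · rw [if_pos (hmem.mpr h), if_pos h]
    · rw [if_neg (fun hh => h (hmem.mp hh)), if_neg h]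

theorem pvSel_skip_zero (m : List Int) : ∀ (xs : List Char) (j : Nat), 1 ≤ j →
    pvSel ((0 : Int) :: m) xs j = pvSel m xs j := by
  intro xs
  induction xs with
  | nil => intro j _; simp [pvSel]
  | cons x xs ih =>
    intro j hj
    simp only [pvSel, ih (j + 1) (by omega)]
    have hiff : ((j : Nat) : Int) ∈ (0 : Int) :: m ↔ ((j : Nat) : Int) ∈ m := by
      simp only [List.mem_cons]
      constructor
      · rintro (h0 | h)
        · exfalso; omega
        · exact h
      · exact Or.inr
    simp [hiff]

-- B's components equal A's canonical components (with ts's tail preserved by the index filter)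
theorem pvB_bridge : ∀ (cs ts : List Char), cs.length ≤ ts.length →
    ((pvM ts cs 0).length : Int) = pvCnt cs ts cs.length ∧
    pvSel (pvM ts cs 0) cs 0 = pvF cs ts cs.length ∧
    pvSel (pvM ts cs 0) ts 0 = pvG cs ts cs.length ++ ts.drop cs.length := by
  intro cs
  induction cs with
  | nil =>
    intro ts _
    refine ⟨by simp [pvM, pvCnt], by simp [pvSel, pvF], ?_⟩
    simp [pvM, pvG, pvSel_nil_mask]
  | cons c cs ih =>
    intro ts hlen
    match ts with
    | [] => simp at hlen
    | t :: ts =>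
      obtain ⟨ihc, ihf, ihg⟩ := ih ts (by simpa using hlen)
      have hM : pvM (t :: ts) (c :: cs) 0
          = (if t = c then [(0 : Int)] else []) ++ (pvM ts cs 0).map (· + 1) := by
        rw [show pvM (t :: ts) (c :: cs) 0
              = (if (t :: ts)[0]? = some c then [(0 : Int)] else []) ++ pvM (t :: ts) cs 1 from rfl,
            pvM_shift]
        simp
      have hz : ∀ x ∈ (pvM ts cs 0).map (· + 1), x ≠ (0 : Int) := by
        intro x hx
        rcases List.mem_map.mp hx with ⟨y, hy, he⟩
        have := pv_mem_pvM_le ts cs 0 y hy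
        omega
      have hzero : (0 : Int) ∈ pvM (t :: ts) (c :: cs) 0 ↔ c = t := by
        rw [hM]
        constructor
        · intro hmem
          rcases List.mem_append.mp hmem with hmem | hmem
          · by_cases hct : t = c
            · exact hct.symm
            · simp [hct] at hmem
          · exfalso; exact hz _ hmem (by norm_num)
        · intro hct; simp [hct]
      have htail : ∀ (xs : List Char), pvSel (pvM (t :: ts) (c :: cs) 0) xs 1
          = pvSel (pvM ts cs 0) xs 0 := by
        intro xs
        rw [hM]
        by_cases hct : t = c
        · rw [if_pos hct]
          rw [show ([(0 : Int)] ++ (pvM ts cs 0).map (· + 1))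
                = (0 : Int) :: (pvM ts cs 0).map (· + 1) from rfl]
          rw [pvSel_skip_zero _ xs 1 le_rfl]
          exact pvSel_shift _ xs 0
        · rw [if_neg hct]
          simp only [List.nil_append]
          exact pvSel_shift _ xs 0
      refine ⟨?_, ?_, ?_⟩
      · simp only [List.length_cons]
        rw [hM, pv_shiftCnt, ← ihc]
        by_cases hct : c = t
        · simp [hct]; omega
        · have htc : ¬ t = c := fun h => hct h.symm
          simp [hct, htc]
      · simp only [List.length_cons]
        rw [show pvSel (pvM (t :: ts) (c :: cs) 0) (c :: cs) 0
                = (if (0 : Int) ∈ pvM (t :: ts) (c :: cs) 0 then [] else [c])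
                  ++ pvSel (pvM (t :: ts) (c :: cs) 0) cs 1 from rfl,
              htail, ihf, pv_shiftF]
        by_cases hct : c = t
        · rw [if_pos (hzero.mpr hct), if_pos hct]
        · rw [if_neg (fun hh => hct (hzero.mp hh)), if_neg hct]
      · simp only [List.length_cons]
        rw [show pvSel (pvM (t :: ts) (c :: cs) 0) (t :: ts) 0
                = (if (0 : Int) ∈ pvM (t :: ts) (c :: cs) 0 then [] else [t])
                  ++ pvSel (pvM (t :: ts) (c :: cs) 0) ts 1 from rfl,
              htail, ihg, pv_shiftG]
        by_cases hct : c = t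
        · rw [if_pos (hzero.mpr hct), if_pos hct]
          simp
        · rw [if_neg (fun hh => hct (hzero.mp hh)), if_neg hct]
          simp

-- ===== VERDICT (by name: the statement is the Claim_ definition above) =====
theorem check_p_spec : Claim_equal_check_p := by
  intro correct type _ hpre
  unfold Spec_check_p check_p check_p_alt pvMatchedSet
  simp only []
  rw [pv_phase1 correct.toList type.toList correct.toList.length]
  rw [pv_phase2 correct.toList type.toList correct.toList.length correct.toList type.toList
        le_rfl hpre (fun _ _ => rfl) (fun _ _ => rfl)]
  obtain ⟨hc, hf, hg⟩ := pvB_bridge correct.toList type.toList hpre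
  have hms := pv_fold_matched type.toList correct.toList 0 [] (by intro x hx; simp at hx)
  have hrc := pv_fold_sel (pvM type.toList correct.toList 0) correct.toList 0 ([] : List Char)
  have hrt := pv_fold_sel (pvM type.toList correct.toList 0) type.toList 0 ([] : List Char)
  rw [Nat.cast_zero] at hms hrc hrt
  rw [List.nil_append] at hms hrc hrt
  rw [show (PySem.Set.empty : PySem.Set Int) = ([] : List Int) from rfl, hms, hrc, hrt]
  simp [PySem.Set.len, hc, hf, hg]
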